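-- pv_equiv track=rewrite | github.com/starplayerr/master-control-protocol | scripts/synthesize/extract.py | _extract_purpose_prose
-- ===== SOURCE A (Python) =====
-- def _extract_purpose_prose(lines: list[str], max_chars: int = 500) -> str:
--     """If Identity has no Purpose row, use a short prose paragraph under ## Identity."""
--     in_identity = False
--     parts: list[str] = []
--     for line in lines:
--         s = line.strip()
--         if s.startswith("## "):
--             if in_identity:
--                 break
--             if s == "## Identity" or s.startswith("## Identity "):
--                 in_identity = True
--             continue
--         if not in_identity:
--             continue
--         if s.startswith("|"):
--             continue
--         if s.startswith("#"):
--             break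
--         if s.startswith("- ") or s.startswith("* "):
--             continue
--         if s:
--             parts.append(s)
--     text = " ".join(parts).strip()
--     if not text or len(text) > max_chars:
--         return ""
--     return text
-- ===== SOURCE B (Python) =====
-- def _extract_purpose_prose(lines: list[str], max_chars: int = 500) -> str:
--     """Three-phase pipeline: locate the Identity heading, slice the block up to
--     the next '#' line, then filter out tables/bullets/blanks."""
--     stripped = [line.strip() for line in lines]
--     start = next((i for i, s in enumerate(stripped)
--                   if s == "## Identity" or s.startswith("## Identity ")), None)
--     if start is None:
--         return ""
--     end = next((j for j in range(start + 1, len(stripped))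
--                 if stripped[j].startswith("#")), len(stripped))
--     parts = [s for s in stripped[start + 1:end]
--              if s and not s.startswith(("|", "- ", "* "))]
--     text = " ".join(parts).strip()
--     if not text or len(text) > max_chars:
--         return ""
--     return text
-- ===== Notes on version B (the rewrite author's own statement) =====
-- stated objective: idiomatic
-- what changed: Replaced A's stateful flag-driven single loop with a three-phase pipeline: find the Identity heading index, find the end index of the block at the next '#' line, then filter the slice with a comprehension.
import Mathlib
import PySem

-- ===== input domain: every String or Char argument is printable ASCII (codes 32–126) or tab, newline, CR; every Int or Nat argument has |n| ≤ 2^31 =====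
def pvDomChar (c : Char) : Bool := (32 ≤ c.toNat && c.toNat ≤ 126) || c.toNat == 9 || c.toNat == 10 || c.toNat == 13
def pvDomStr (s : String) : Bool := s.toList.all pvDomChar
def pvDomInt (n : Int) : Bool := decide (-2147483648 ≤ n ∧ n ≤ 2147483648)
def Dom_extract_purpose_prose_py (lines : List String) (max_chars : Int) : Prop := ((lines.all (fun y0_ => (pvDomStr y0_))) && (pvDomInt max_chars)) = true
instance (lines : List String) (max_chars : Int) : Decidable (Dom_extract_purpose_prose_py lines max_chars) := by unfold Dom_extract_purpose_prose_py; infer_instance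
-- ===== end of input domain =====

-- B rewrites A's flag-driven single loop as a find-heading / find-end / filter-slice pipeline (idiomatic; same cost).

-- ===== PORT A =====
-- the flag-driven loop: returns the collected `parts` (break = stop)
def pvGoA : List String → Bool → List String
  | [], _ => []
  | line :: rest, inId =>
    let s := PySem.Str.strip line
    if PySem.Str.startswith s "## " then
      if inId then []
      else if s == "## Identity" || PySem.Str.startswith s "## Identity " then pvGoA rest true
      else pvGoA rest inId
    else if !inId then pvGoA rest inId
    else if PySem.Str.startswith s "|" then pvGoA rest inId
    else if PySem.Str.startswith s "#" then []
    else if PySem.Str.startswith s "- " || PySem.Str.startswith s "* " then pvGoA rest inId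
    else if s == "" then pvGoA rest inId
    else s :: pvGoA rest inId

def extract_purpose_prose_py (lines : List String) (max_chars : Int) : String :=
  let parts := pvGoA lines false
  let text := PySem.Str.strip (PySem.Str.join " " parts)
  if text == "" || PySem.Str.len text > max_chars then "" else text

-- ===== PORT B =====
def pvIsIdentityHead (s : String) : Bool :=
  s == "## Identity" || PySem.Str.startswith s "## Identity "

def pvKeep (s : String) : Bool :=
  s != "" && !PySem.Str.startswith s "|" && !PySem.Str.startswith s "- " && !PySem.Str.startswith s "* "

def extract_purpose_prose_py_alt (lines : List String) (max_chars : Int) : String :=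
  let stripped := lines.map PySem.Str.strip
  match stripped.findIdx? pvIsIdentityHead with
  | none => ""
  | some start =>
    -- Source B's "first '#' index after start, then slice stripped[start+1:end]"
    -- = takeWhile (no '#' prefix) on the suffix after the heading
    let block := (stripped.drop (start + 1)).takeWhile (fun s => !PySem.Str.startswith s "#")
    let parts := block.filter pvKeep
    let text := PySem.Str.strip (PySem.Str.join " " parts)
    if text == "" || PySem.Str.len text > max_chars then "" else text

-- ===== PRECONDITION & SPEC =====
def Spec_extract_purpose_prose_py (lines : List String) (max_chars : Int) (out : String) : Prop := out = extract_purpose_prose_py_alt lines max_chars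
instance (lines : List String) (max_chars : Int) (out : String) : Decidable (Spec_extract_purpose_prose_py lines max_chars out) := by unfold Spec_extract_purpose_prose_py; infer_instance

-- ===== CLAIM (what is proved, stated in full; the proofs are below) =====
def Claim_equal_extract_purpose_prose_py : Prop := ∀ (lines : List String) (max_chars : Int), Dom_extract_purpose_prose_py lines max_chars → Spec_extract_purpose_prose_py lines max_chars (extract_purpose_prose_py lines max_chars)

-- ===== LEMMAS AND PROOFS =====

-- the same loop, over pre-stripped lines
def pvGoS : List String → Bool → List String
  | [], _ => []
  | s :: rest, inId =>
    if PySem.Str.startswith s "## " then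
      if inId then []
      else if s == "## Identity" || PySem.Str.startswith s "## Identity " then pvGoS rest true
      else pvGoS rest inId
    else if !inId then pvGoS rest inId
    else if PySem.Str.startswith s "|" then pvGoS rest inId
    else if PySem.Str.startswith s "#" then []
    else if PySem.Str.startswith s "- " || PySem.Str.startswith s "* " then pvGoS rest inId
    else if s == "" then pvGoS rest inId
    else s :: pvGoS rest inId

theorem pvGoA_eq_goS (lines : List String) (b : Bool) :
    pvGoA lines b = pvGoS (lines.map PySem.Str.strip) b := by
  induction lines generalizing b with
  | nil => rfl
  | cons x xs ih => simp only [pvGoA, pvGoS, List.map]; split_ifs <;> simp [ih]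

theorem pv_c_mono (l : List Char) {p q : List Char} (h : PySem.Chars.startswith l q = true)
    (hp : p <+: q) : PySem.Chars.startswith l p = true := by
  simp only [PySem.Chars.startswith_iff] at h ⊢
  exact hp.trans h

theorem pv_head_sw (s : String) (h : pvIsIdentityHead s = true) :
    PySem.Str.startswith s "## " = true := by
  unfold pvIsIdentityHead at h
  rcases Bool.or_eq_true_iff.mp h with h | h
  · have : s = "## Identity" := by exact_mod_cast of_decide_eq_true h
    subst this; decide
  · simp only [PySem.Str.startswith_eq] at h ⊢
    exact pv_c_mono _ h (by decide)

theorem pvGoS_none (xs : List String) (h : xs.findIdx? pvIsIdentityHead = none) :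
    pvGoS xs false = [] := by
  induction xs with
  | nil => rfl
  | cons x xs ih =>
    rw [List.findIdx?_cons] at h
    by_cases hx : pvIsIdentityHead x
    · simp [hx] at h
    · have hrec := ih (by simpa [hx] using h)
      have hx' : (x == "## Identity" || PySem.Str.startswith x "## Identity ") = false := by
        simpa [pvIsIdentityHead] using hx
      simp only [pvGoS]
      split_ifs with h1 h2 <;> simp_all

theorem pvGoS_some (xs : List String) (i : Nat)
    (h : xs.findIdx? pvIsIdentityHead = some i) :
    pvGoS xs false = pvGoS (xs.drop (i + 1)) true := by
  induction xs generalizing i with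
  | nil => simp at h
  | cons x xs ih =>
    rw [List.findIdx?_cons] at h
    by_cases hx : pvIsIdentityHead x
    · simp only [hx, if_pos] at h
      obtain rfl : i = 0 := by simpa using h.symm
      have hsw : PySem.Chars.startswith x.toList ['#', '#', ' '] = true := by
        simpa using pv_head_sw x hx
      have hx2 : x = "## Identity" ∨
          PySem.Chars.startswith x.toList
            ['#', '#', ' ', 'I', 'd', 'e', 'n', 't', 'i', 't', 'y', ' '] = true := by
        simpa [pvIsIdentityHead] using hx
      simp [pvGoS, hsw, hx2]
    · simp only [hx, if_neg, Bool.false_eq_true, not_false_iff] at h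
      rcases Option.map_eq_some_iff.mp h with ⟨j, hj, rfl⟩
      have hrec := ih j hj
      have hx' : (x == "## Identity" || PySem.Str.startswith x "## Identity ") = false := by
        simpa [pvIsIdentityHead] using hx
      simp only [pvGoS]
      split_ifs with h1 h2 <;> simp_all [List.drop_succ_cons]

theorem pvGoS_true (xs : List String) :
    pvGoS xs true =
      (xs.takeWhile (fun s => !PySem.Str.startswith s "#")).filter pvKeep := by
  induction xs with
  | nil => rfl
  | cons x xs ih =>
    simp only [pvGoS, List.takeWhile_cons, PySem.Str.startswith_eq] at *
    by_cases hhash : PySem.Chars.startswith x.toList ['#'] = true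
    · have hbar : PySem.Chars.startswith x.toList ['|'] = false := by
        by_contra hc
        simp only [Bool.not_eq_false, PySem.Chars.startswith_iff] at hc
        rcases (PySem.Chars.startswith_iff _ _).mp hhash with ⟨t1, h1⟩
        rcases hc with ⟨t2, h2⟩
        rw [← h1] at h2; simp at h2
      cases h3 : PySem.Chars.startswith x.toList ['#', '#', ' '] <;>
        simp [h3, hhash, hbar]
    · have hhh : PySem.Chars.startswith x.toList ['#', '#', ' '] = false := by
        by_contra hc
        simp only [Bool.not_eq_false] at hc
        exact hhash (pv_c_mono _ hc (by decide))
      rw [ih]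
      split_ifs <;> simp_all [List.filter_cons, pvKeep] <;>
        (rename_i hor
         intro _ hd
         rcases hor with hsw | hsw
         · rw [hsw] at hd; cases hd
         · exact hsw)

-- ===== VERDICT (by name: the statement is the Claim_ definition above) =====
theorem extract_purpose_prose_py_spec : Claim_equal_extract_purpose_prose_py := by
  intro lines max_chars _
  show extract_purpose_prose_py lines max_chars = extract_purpose_prose_py_alt lines max_chars
  unfold extract_purpose_prose_py extract_purpose_prose_py_alt
  dsimp only
  rw [pvGoA_eq_goS]
  cases h : (lines.map PySem.Str.strip).findIdx? pvIsIdentityHead with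
  | none =>
    rw [pvGoS_none _ h]
    have hj : PySem.Str.strip (PySem.Str.join " " ([] : List String)) = "" := by decide
    simp [hj]
  | some i =>
    rw [pvGoS_some _ i h, pvGoS_true]
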